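-- pv_equiv track=rewrite | github.com/Michiel29/graphqa | optim/multi_adam.py | get_param_group_index
-- ===== SOURCE A (Python) =====
-- def get_param_group_index(groups, param_name):
--     index = None
--     for i, group in enumerate(groups):
--         if (
--             (len(group['prefix']) == 0 or group['prefix'] in param_name)
--             and (index is None or len(groups[index]['prefix']) < len(group['prefix']))
--         ):
--             index = i
--     return index
-- ===== SOURCE B (Python) =====
-- def get_param_group_index(groups, param_name):
--     # Sort indices by (prefix length descending, original index ascending),
--     # then return the first index whose group matches; None if none matches.
--     order = sorted(range(len(groups)),
--                    key=lambda i: (-len(groups[i]['prefix']), i))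
--     for i in order:
--         prefix = groups[i]['prefix']
--         if len(prefix) == 0 or prefix in param_name:
--             return i
--     return None
-- ===== Notes on version B (the rewrite author's own statement) =====
-- stated objective: alternative
-- what changed: Replaces A's single running-max scan (keep index when a strictly longer matching prefix appears) by sorting the group indices once by (prefix length descending, index ascending) and returning the first index in that order whose prefix is empty or a substring of param_name.
-- outside the precondition, e.g. on get_param_group_index([{}], 'x'): A raises KeyError, B raises KeyError
import Mathlib
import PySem

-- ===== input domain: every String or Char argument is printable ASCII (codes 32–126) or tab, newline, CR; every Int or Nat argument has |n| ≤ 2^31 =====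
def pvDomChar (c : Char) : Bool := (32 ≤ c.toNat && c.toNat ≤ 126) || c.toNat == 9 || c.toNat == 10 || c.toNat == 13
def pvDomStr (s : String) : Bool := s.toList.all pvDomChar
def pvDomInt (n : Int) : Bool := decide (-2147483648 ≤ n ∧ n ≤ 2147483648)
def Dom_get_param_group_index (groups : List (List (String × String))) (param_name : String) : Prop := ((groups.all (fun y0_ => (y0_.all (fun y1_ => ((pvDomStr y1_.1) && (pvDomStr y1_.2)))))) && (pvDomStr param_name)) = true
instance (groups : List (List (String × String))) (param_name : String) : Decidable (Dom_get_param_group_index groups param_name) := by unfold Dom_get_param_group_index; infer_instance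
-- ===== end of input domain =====

-- B re-implements the running-max scan as sort-indices-by-(prefix-length desc, index) then
-- return the first matching index (objective: alternative decomposition, no speed claim).

-- group['prefix'] (both Pythons read it the same way; "" is only reached outside Pre_,
-- where Python raises KeyError and nothing is claimed)
def pvPrefix (g : List (String × String)) : String :=
  PySem.Dict.getD (PySem.Dict.mk g) "prefix" ""

-- ===== PORT A =====
def get_param_group_index (groups : List (List (String × String))) (param_name : String) : Option Int :=
  (PySem.List.enumerate groups).foldl
    (fun index ig =>
      if (PySem.Str.len (pvPrefix ig.2) == 0 || PySem.Str.isIn (pvPrefix ig.2) param_name)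
         && (match index with
             | none => true
             | some j => decide (PySem.Str.len (pvPrefix (PySem.List.pyGetD groups j [])) < PySem.Str.len (pvPrefix ig.2)))
      then some ig.1 else index)
    none

-- ===== PORT B =====
def get_param_group_index_alt (groups : List (List (String × String))) (param_name : String) : Option Int :=
  (PySem.List.sorted2 (PySem.List.pyRange 0 (PySem.List.len groups))
      (fun i => -(PySem.Str.len (pvPrefix (PySem.List.pyGetD groups i []))))
      (fun i => i)).find?
    (fun i =>
      PySem.Str.len (pvPrefix (PySem.List.pyGetD groups i [])) == 0
        || PySem.Str.isIn (pvPrefix (PySem.List.pyGetD groups i [])) param_name)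

-- ===== PRECONDITION & SPEC =====
-- Pre_ excludes exactly the inputs where some group lacks the key 'prefix': there Python A
-- (and Python B) raises KeyError.
def Pre_get_param_group_index (groups : List (List (String × String))) (param_name : String) : Prop :=
  ∀ g ∈ groups, (PySem.Dict.mk g).contains "prefix" = true
instance (groups : List (List (String × String))) (param_name : String) : Decidable (Pre_get_param_group_index groups param_name) := by unfold Pre_get_param_group_index; infer_instance

def pvWitness_get_param_group_index : (List (List (String × String))) × String :=
  ([[("prefix", "w")], [("prefix", "")], [("prefix", "wei")]], "layer1.weight")

def Spec_get_param_group_index (groups : List (List (String × String))) (param_name : String) (out : Option Int) : Prop := out = get_param_group_index_alt groups param_name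
instance (groups : List (List (String × String))) (param_name : String) (out : Option Int) : Decidable (Spec_get_param_group_index groups param_name out) := by unfold Spec_get_param_group_index; infer_instance

-- ===== CLAIM (what is proved, stated in full; the proofs are below) =====
def Claim_equal_get_param_group_index : Prop := ∀ (groups : List (List (String × String))) (param_name : String), Dom_get_param_group_index groups param_name → Pre_get_param_group_index groups param_name → Spec_get_param_group_index groups param_name (get_param_group_index groups param_name)

-- ===== LEMMAS AND PROOFS =====

-- prefix length of group i (0 outside range / missing key — unreachable inside Pre_)
def pvKey (groups : List (List (String × String))) (i : Int) : Int :=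
  PySem.Str.len (pvPrefix (PySem.List.pyGetD groups i []))

-- does group i match param_name
def pvMatch (groups : List (List (String × String))) (param_name : String) (i : Int) : Bool :=
  PySem.Str.len (pvPrefix (PySem.List.pyGetD groups i [])) == 0
    || PySem.Str.isIn (pvPrefix (PySem.List.pyGetD groups i [])) param_name

-- A's loop body, specialised to index j of groups
def pvStep (groups : List (List (String × String))) (param_name : String)
    (index : Option Int) (j : Int) : Option Int :=
  if pvMatch groups param_name j
     && (match index with
         | none => true
         | some k => decide (pvKey groups k < pvKey groups j))
  then some j else index

-- the common characterisation: r is the earliest index of maximal prefix length among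
-- the matching indices in [0, n), or none when no index matches
def pvGood (groups : List (List (String × String))) (param_name : String)
    (n : Int) (r : Option Int) : Prop :=
  match r with
  | none => ∀ i : Int, 0 ≤ i → i < n → pvMatch groups param_name i = false
  | some j => 0 ≤ j ∧ j < n ∧ pvMatch groups param_name j = true ∧
      ∀ i : Int, 0 ≤ i → i < n → pvMatch groups param_name i = true →
        (pvKey groups i < pvKey groups j ∨ (pvKey groups i = pvKey groups j ∧ j ≤ i))

theorem pvGood_unique (groups : List (List (String × String))) (param_name : String)
    (n : Int) (r1 r2 : Option Int)
    (h1 : pvGood groups param_name n r1) (h2 : pvGood groups param_name n r2) : r1 = r2 := by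
  cases r1 with
  | none =>
    cases r2 with
    | none => rfl
    | some j => exact absurd (h1 j h2.1 h2.2.1) (by simp [h2.2.2.1])
  | some j =>
    cases r2 with
    | none => exact absurd (h2 j h1.1 h1.2.1) (by simp [h1.2.2.1])
    | some k =>
      have hjk := h2.2.2.2 j h1.1 h1.2.1 h1.2.2.1
      have hkj := h1.2.2.2 k h2.1 h2.2.1 h2.2.2.1
      have : j = k := by omega
      simp [this]

theorem pvA_good (groups : List (List (String × String))) (param_name : String) (n : Nat) :
    pvGood groups param_name (n : Int)
      ((PySem.List.pyRange 0 (n : Int)).foldl (pvStep groups param_name) none) := by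
  induction n with
  | zero =>
    rw [PySem.List.pyRange_one_eq_nil (by norm_num)]
    intro i h0 hn
    omega
  | succ m ih =>
    have hcast : ((m + 1 : Nat) : Int) = (m : Int) + 1 := by push_cast; ring
    rw [hcast, PySem.List.pyRange_one_succ_right (by positivity), List.foldl_append]
    set r := (PySem.List.pyRange 0 (m : Int)).foldl (pvStep groups param_name) none with hr
    simp only [List.foldl_cons, List.foldl_nil]
    cases hm : pvMatch groups param_name (m : Int) with
    | true =>
      cases hreq : r with
      | none =>
        rw [hreq] at ih
        have hstep : pvStep groups param_name none (m : Int) = some (m : Int) := by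
          simp [pvStep, hm]
        rw [hstep]
        refine ⟨by positivity, by omega, hm, ?_⟩
        intro i h0 hn hi
        rcases lt_or_ge i (m : Int) with h | h
        · exact absurd (ih i h0 h) (by simp [hi])
        · have hieq : i = (m : Int) := by omega
          subst hieq
          right; exact ⟨rfl, le_refl _⟩
      | some j =>
        rw [hreq] at ih
        by_cases hlt : pvKey groups j < pvKey groups (m : Int)
        · have hstep : pvStep groups param_name (some j) (m : Int) = some (m : Int) := by
            simp [pvStep, hm, hlt]
          rw [hstep]
          refine ⟨by positivity, by omega, hm, ?_⟩
          intro i h0 hn hi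
          rcases lt_or_ge i (m : Int) with h | h
          · rcases ih.2.2.2 i h0 h hi with hc | hc <;> [left; left] <;> omega
          · have hieq : i = (m : Int) := by omega
            subst hieq
            right; exact ⟨rfl, le_refl _⟩
        · have hstep : pvStep groups param_name (some j) (m : Int) = some j := by
            simp [pvStep, hlt]
          rw [hstep]
          refine ⟨ih.1, by have := ih.2.1; omega, ih.2.2.1, ?_⟩
          intro i h0 hn hi
          rcases lt_or_ge i (m : Int) with h | h
          · exact ih.2.2.2 i h0 h hi
          · have hieq : i = (m : Int) := by omega
            subst hieq
            rcases lt_or_eq_of_le (not_lt.mp hlt) with h' | h'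
            · left; exact h'
            · right; exact ⟨h', le_of_lt ih.2.1⟩
    | false =>
      have hstep : pvStep groups param_name r (m : Int) = r := by
        simp [pvStep, hm]
      rw [hstep]
      cases hreq : r with
      | none =>
        rw [hreq] at ih
        intro i h0 hn
        rcases lt_or_ge i (m : Int) with h | h
        · exact ih i h0 h
        · have hieq : i = (m : Int) := by omega
          subst hieq
          exact hm
      | some j =>
        rw [hreq] at ih
        refine ⟨ih.1, by have := ih.2.1; omega, ih.2.2.1, ?_⟩
        intro i h0 hn hi
        rcases lt_or_ge i (m : Int) with h | h
        · exact ih.2.2.2 i h0 h hi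
        · have hieq : i = (m : Int) := by omega
          subst hieq
          exact absurd hi (by simp [hm])

-- sorting by the pair key (k i, i) with the stable two-key sort is sorting by the
-- injective lexicographic key i ↦ toLex (k i, i)
theorem pvSorted2_eq_sorted_lex (xs : List Int) (k : Int → Int) :
    PySem.List.sorted2 xs k (fun i => i)
      = PySem.List.sorted xs (fun i => toLex (k i, i)) := by
  rw [PySem.List.sorted_eq_foldl_insertBy]
  show List.foldl _ [] xs = _
  have hb : (fun a b : Int => decide (k a < k b) || (!decide (k b < k a) && decide (a < b)))
      = (fun a b : Int => decide (toLex (k a, a) < toLex (k b, b))) := by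
    funext a b
    by_cases h1 : k a < k b
    · simp [h1, Prod.Lex.lt_iff, not_lt.mpr (le_of_lt h1)]
    · by_cases h2 : k b < k a
      · simp [h1, h2, Prod.Lex.lt_iff]
        omega
      · have he : k a = k b := le_antisymm (not_lt.mp h2) (not_lt.mp h1)
        simp [Prod.Lex.lt_iff, he]
  rw [hb]
  simp

theorem pvB_good (groups : List (List (String × String))) (param_name : String)
    (n : Int) (s : List Int)
    (hperm : s.Perm (PySem.List.pyRange 0 n))
    (hpair : s.Pairwise (fun a b =>
      (toLex (-(pvKey groups a), a) : Lex (Int × Int)) < toLex (-(pvKey groups b), b))) :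
    pvGood groups param_name n (s.find? (pvMatch groups param_name)) := by
  cases hf : s.find? (pvMatch groups param_name) with
  | none =>
    intro i h0 hn
    have hi : i ∈ s := hperm.mem_iff.mpr (PySem.List.mem_pyRange_one.mpr ⟨h0, hn⟩)
    have := List.find?_eq_none.mp hf i hi
    simpa using this
  | some j =>
    rcases List.find?_eq_some_iff_append.mp hf with ⟨hj, l1, l2, hsplit, hl1⟩
    have hjmem : j ∈ s := by rw [hsplit]; simp
    have hjR := PySem.List.mem_pyRange_one.mp (hperm.mem_iff.mp hjmem)
    refine ⟨hjR.1, hjR.2, hj, ?_⟩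
    intro i h0 hn hi
    have himem : i ∈ s := hperm.mem_iff.mpr (PySem.List.mem_pyRange_one.mpr ⟨h0, hn⟩)
    rw [hsplit] at himem hpair
    rcases List.mem_append.mp himem with h | h
    · exact absurd hi (by simpa using hl1 i h)
    · rcases List.mem_cons.mp h with h | h
      · subst h; right; exact ⟨rfl, le_refl _⟩
      · have := (List.pairwise_append.mp hpair).2.1
        have hlt := (List.pairwise_cons.mp this).1 i h
        rw [Prod.Lex.lt_iff] at hlt
        simp only [ofLex_toLex] at hlt
        rcases hlt with h' | h'
        · left; omega
        · right; exact ⟨by omega, le_of_lt h'.2⟩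

theorem pvA_eq_foldl (groups : List (List (String × String))) (param_name : String) :
    get_param_group_index groups param_name
      = (PySem.List.pyRange 0 (PySem.List.len groups)).foldl (pvStep groups param_name) none := by
  unfold get_param_group_index
  rw [PySem.List.enumerate_eq_map_pyRange groups [], List.foldl_map]
  rfl

-- ===== VERDICT (by name: the statement is the Claim_ definition above) =====
theorem get_param_group_index_spec : Claim_equal_get_param_group_index := by
  intro groups param_name _ _
  unfold Spec_get_param_group_index
  have hlen : PySem.List.len groups = (groups.length : Int) := by simp [PySem.List.len_eq]
  have hA : pvGood groups param_name (groups.length : Int) (get_param_group_index groups param_name) := by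
    rw [pvA_eq_foldl, hlen]
    exact pvA_good groups param_name groups.length
  have hB : pvGood groups param_name (groups.length : Int) (get_param_group_index_alt groups param_name) := by
    unfold get_param_group_index_alt
    rw [pvSorted2_eq_sorted_lex, hlen]
    set key : Int → Lex (Int × Int) := fun i => toLex (-(pvKey groups i), i) with hkey
    have hperm := PySem.List.sorted_perm (PySem.List.pyRange 0 (groups.length : Int)) key false
    have hle := PySem.List.sorted_pairwise (PySem.List.pyRange 0 (groups.length : Int)) key
    have hnd : (PySem.List.sorted (PySem.List.pyRange 0 (groups.length : Int)) key).Nodup :=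
      hperm.nodup_iff.mpr (PySem.List.nodup_pyRange_one 0 (groups.length : Int))
    have hpair := (hle.and hnd).imp (fun {a b} h => by
      rcases h with ⟨hle', hne⟩
      refine lt_of_le_of_ne hle' (fun he => hne ?_)
      have := congrArg (fun x : Lex (Int × Int) => (ofLex x).2) he
      simpa [hkey] using this)
    exact pvB_good groups param_name (groups.length : Int) _ hperm hpair
  exact pvGood_unique groups param_name _ _ _ hA hB
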